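-- pv_equiv track=rewrite | github.com/becker94/99-probl-me | 99 probleme/tux/solution.py | tux
-- ===== SOURCE A (Python) =====
-- def tux(numbers: list[int]) -> int:
--   longueur_n = len(numbers)
--
--   if longueur_n == 0:
--     return -1
--
--   if longueur_n == 1:
--     return 0
--
--   max_val = numbers[0]
--   max_index = 0
--
--   for i in range(1, longueur_n):
--     if numbers[i] > max_val:
--       max_val = numbers[i]
--       max_index = i
--
--   if max_index == 0 or max_index == longueur_n - 1:
--     return max_index
--
--   min_val = max_val
--   for i in range(max_index - 1, -1, -1):
--     min_val = min(min_val, numbers[i])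
--
--   if max_val > min_val and max_val > numbers[max_index + 1]:
--     return max_index
--
--   return -1
-- ===== SOURCE B (Python) =====
-- def tux(numbers: list[int]) -> int:
--   if not numbers:
--     return -1
--   # one fused right-to-left pass: (m, off, a, prev) = max of the suffix seen so far,
--   # index of its first occurrence within that suffix, the element just after it
--   # (None if it is the suffix's last element), and the suffix's first element
--   m = numbers[-1]
--   off = 0
--   a = None
--   prev = m
--   for x in reversed(numbers[:-1]):
--     if x >= m:
--       m, off, a = x, 0, prev
--     else:
--       off += 1
--     prev = x
--   if off == 0 or a is None:
--     return off
--   return off if m > a else -1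
-- ===== Notes on version B (the rewrite author's own statement) =====
-- stated objective: alternative
-- what changed: Replaces A's three staged forward loops (max-tracking scan, backward min-scan, neighbor test) with a single fused right-to-left pass whose accumulator carries the suffix maximum, the offset of its first occurrence, the element just after it, and the previous element, so the answer falls out of one traversal with no index arithmetic or second scan.
import Mathlib
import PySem

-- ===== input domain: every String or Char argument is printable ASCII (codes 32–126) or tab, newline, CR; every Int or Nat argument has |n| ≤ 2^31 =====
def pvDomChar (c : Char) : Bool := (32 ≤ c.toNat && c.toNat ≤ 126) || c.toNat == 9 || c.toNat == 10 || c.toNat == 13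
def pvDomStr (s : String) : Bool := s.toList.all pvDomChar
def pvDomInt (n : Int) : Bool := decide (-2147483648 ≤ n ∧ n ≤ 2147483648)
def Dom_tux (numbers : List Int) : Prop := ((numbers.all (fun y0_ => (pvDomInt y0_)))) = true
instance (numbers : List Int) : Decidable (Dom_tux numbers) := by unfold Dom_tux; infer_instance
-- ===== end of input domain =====

-- B replaces A's three staged forward loops by ONE fused right-to-left pass that carries
-- (suffix max, offset of its first occurrence, element after it, previous element) (objective: alternative).

-- ===== PORT A =====
-- A's max-tracking loop body: 'if numbers[i] > max_val: max_val, max_index = numbers[i], i'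
-- (indices are in range on every reached input, so pyGetD with default 0 is exact)
def tuxStep (numbers : List Int) (s : Int × Int) (i : Int) : Int × Int :=
  if PySem.List.pyGetD numbers i 0 > s.1 then (PySem.List.pyGetD numbers i 0, i) else s

def tux (numbers : List Int) : Int :=
  let n : Int := numbers.length
  if n = 0 then -1
  else if n = 1 then 0
  else
    let s := (PySem.List.pyRange 1 n 1).foldl (tuxStep numbers) (PySem.List.pyGetD numbers 0 0, 0)
    if s.2 = 0 ∨ s.2 = n - 1 then s.2
    else
      let minVal := (PySem.List.pyRange (s.2 - 1) (-1) (-1)).foldl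
        (fun m i => min m (PySem.List.pyGetD numbers i 0)) s.1
      if s.1 > minVal ∧ s.1 > PySem.List.pyGetD numbers (s.2 + 1) 0 then s.2 else -1

-- ===== PORT B =====
-- B's loop body: state (m, off, a, prev); 'if x >= m: m, off, a = x, 0, prev; else: off += 1; prev = x'
def tuxAltStep (s : Int × Int × Option Int × Int) (x : Int) : Int × Int × Option Int × Int :=
  if x ≥ s.1 then (x, 0, some s.2.2.2, x) else (s.1, s.2.1 + 1, s.2.2.1, x)

def tux_alt (numbers : List Int) : Int :=
  if numbers = [] then -1
  else
    let m0 := PySem.List.pyGetD numbers (-1) 0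
    -- 'for x in reversed(numbers[:-1])'
    let s := (PySem.List.slice numbers none (some (-1))).reverse.foldl tuxAltStep (m0, 0, none, m0)
    if s.2.1 = 0 then s.2.1
    else match s.2.2.1 with
      | none => s.2.1
      | some v => if s.1 > v then s.2.1 else -1

-- ===== PRECONDITION & SPEC =====
def Spec_tux (numbers : List Int) (out : Int) : Prop := out = tux_alt numbers
instance (numbers : List Int) (out : Int) : Decidable (Spec_tux numbers out) := by unfold Spec_tux; infer_instance

-- ===== CLAIM (what is proved, stated in full; the proofs are below) =====
def Claim_equal_tux : Prop := ∀ (numbers : List Int), Dom_tux numbers → Spec_tux numbers (tux numbers)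

-- ===== LEMMAS AND PROOFS =====

-- Invariant of A's max-tracking loop: the state holds the max so far and the FIRST index attaining it.
lemma tux_fold_inv (numbers : List Int) (a M k : Int)
    (ha : 1 ≤ a) (han : a ≤ (numbers.length : Int))
    (hk0 : 0 ≤ k) (hka : k < a)
    (hMk : PySem.List.pyGetD numbers k 0 = M)
    (hle : ∀ j : Int, 0 ≤ j → j < a → PySem.List.pyGetD numbers j 0 ≤ M)
    (hlt : ∀ j : Int, 0 ≤ j → j < k → PySem.List.pyGetD numbers j 0 < M) :
    let r := (PySem.List.pyRange a (numbers.length : Int) 1).foldl (tuxStep numbers) (M, k)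
    (0 ≤ r.2 ∧ r.2 < (numbers.length : Int)) ∧ PySem.List.pyGetD numbers r.2 0 = r.1 ∧
    (∀ j : Int, 0 ≤ j → j < (numbers.length : Int) → PySem.List.pyGetD numbers j 0 ≤ r.1) ∧
    (∀ j : Int, 0 ≤ j → j < r.2 → PySem.List.pyGetD numbers j 0 < r.1) := by
  intro r
  induction hfuel : ((numbers.length : Int) - a).toNat generalizing a M k with
  | zero =>
    have haeq : a = (numbers.length : Int) := by omega
    simp only [r, haeq, PySem.List.pyRange_one_eq_nil (le_refl _), List.foldl_nil]
    exact ⟨⟨hk0, by omega⟩, hMk, fun j h0 h1 => hle j h0 (by omega), hlt⟩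
  | succ t ih =>
    have hlt' : a < (numbers.length : Int) := by omega
    simp only [r, PySem.List.pyRange_one_cons hlt', List.foldl_cons]
    by_cases h : PySem.List.pyGetD numbers a 0 > M
    · have hstep : tuxStep numbers (M, k) a = (PySem.List.pyGetD numbers a 0, a) := by
        simp [tuxStep, h]
      rw [hstep]
      exact ih (a + 1) (PySem.List.pyGetD numbers a 0) a (by omega) (by omega) (by omega)
        (by omega) rfl
        (fun j h0 h1 => by
          by_cases hja : j = a
          · simp [hja]
          · exact le_of_lt (lt_of_le_of_lt (hle j h0 (by omega)) h))
        (fun j h0 h1 => lt_of_le_of_lt (hle j h0 (by omega)) h)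
        (by omega)
    · have hstep : tuxStep numbers (M, k) a = (M, k) := by simp [tuxStep, h]
      rw [hstep]
      exact ih (a + 1) M k (by omega) (by omega) hk0 (by omega) hMk
        (fun j h0 h1 => by
          by_cases hja : j = a
          · subst hja; omega
          · exact hle j h0 (by omega))
        hlt (by omega)

-- A's backward min-scan never exceeds numbers[0] (0 is the last index it visits).
lemma tux_min_fold_le_zero (numbers : List Int) (a : Int) (ha : 0 ≤ a) (m : Int) :
    (PySem.List.pyRange a (-1) (-1)).foldl (fun m i => min m (PySem.List.pyGetD numbers i 0)) m
      ≤ PySem.List.pyGetD numbers 0 0 := by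
  induction hfuel : a.toNat generalizing a m with
  | zero =>
    have : a = 0 := by omega
    subst this
    rw [PySem.List.pyRange_neg_one_cons (by omega),
        PySem.List.pyRange_neg_one_eq_nil (by omega)]
    simp
  | succ t ih =>
    rw [PySem.List.pyRange_neg_one_cons (by omega)]
    simp only [List.foldl_cons]
    exact ih (a - 1) (by omega) (min m (PySem.List.pyGetD numbers a 0)) (by omega)

-- getLastD ignores the default on a nonempty list.
lemma tux_getLastD_cons_ne {α : Type} (x d : α) (ys : List α) (h : ys ≠ []) :
    (x :: ys).getLastD d = ys.getLastD d := by
  cases ys with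
  | nil => exact absurd rfl h
  | cons y t => simp

-- B's fold state over a nonempty list ys (right-to-left pass over ys).
def tuxAltState (ys : List Int) : Int × Int × Option Int × Int :=
  ys.dropLast.reverse.foldl tuxAltStep (ys.getLastD 0, 0, none, ys.getLastD 0)

-- Peeling the leftmost element: the backward pass over x :: ys is one more step on ys's pass.
lemma tuxAltState_cons (x : Int) (ys : List Int) (h : ys ≠ []) :
    tuxAltState (x :: ys) = tuxAltStep (tuxAltState ys) x := by
  unfold tuxAltState
  rw [List.dropLast_cons_of_ne_nil h, List.reverse_cons, List.foldl_append,
      tux_getLastD_cons_ne x 0 ys h]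
  simp

-- Invariant of B's backward pass: state = (max, offset of first max, element after it, head).
lemma tux_alt_inv (ys : List Int) (h : ys ≠ []) :
    ∃ k : Nat,
      (tuxAltState ys).2.1 = (k : Int) ∧
      ys[k]? = some (tuxAltState ys).1 ∧
      (∀ j : Nat, ∀ v, ys[j]? = some v → v ≤ (tuxAltState ys).1) ∧
      (∀ j : Nat, j < k → ∀ v, ys[j]? = some v → v < (tuxAltState ys).1) ∧
      (tuxAltState ys).2.2.1 = ys[k + 1]? ∧
      ys[0]? = some (tuxAltState ys).2.2.2 := by
  induction ys with
  | nil => exact absurd rfl h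
  | cons x ys ih =>
    cases hys : ys with
    | nil =>
      subst hys
      have hst : tuxAltState [x] = (x, 0, none, x) := rfl
      refine ⟨0, by simp [hst], by simp [hst], ?_, by omega, by simp [hst], by simp [hst]⟩
      intro j v hv
      rw [hst]
      cases j with
      | zero => simp at hv; omega
      | succ j => simp at hv
    | cons y t =>
      have hne : ys ≠ [] := by simp [hys]
      rw [← hys] at *
      obtain ⟨k, hk, hget, hub, hfirst, ha, hp⟩ := ih hne
      rw [tuxAltState_cons x ys hne]
      set s := tuxAltState ys with hs
      by_cases hx : x ≥ s.1
      · have hstep : tuxAltStep s x = (x, 0, some s.2.2.2, x) := by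
          simp [tuxAltStep, hx]
        rw [hstep]
        refine ⟨0, rfl, by simp, ?_, by omega, ?_, by simp⟩
        · intro j v hv
          cases j with
          | zero => simp at hv; omega
          | succ j =>
            simp only [List.getElem?_cons_succ] at hv
            have := hub j v hv; omega
        · simpa using hp.symm
      · have hstep : tuxAltStep s x = (s.1, s.2.1 + 1, s.2.2.1, x) := by
          simp [tuxAltStep, hx]
        rw [hstep]
        refine ⟨k + 1, by push_cast; omega, by simpa using hget, ?_, ?_, by simpa using ha, by simp⟩
        · intro j v hv
          cases j with
          | zero => simp at hv; omega
          | succ j =>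
            simp only [List.getElem?_cons_succ] at hv
            exact hub j v hv
        · intro j hj v hv
          cases j with
          | zero => simp at hv; omega
          | succ j =>
            simp only [List.getElem?_cons_succ] at hv
            exact hfirst j (by omega) v hv

-- ===== VERDICT (by name: the statement is the Claim_ definition above) =====
theorem tux_spec : Claim_equal_tux := by
  intro numbers _
  unfold Spec_tux tux tux_alt
  by_cases hnil : numbers = []
  · subst hnil; simp
  · have hn1 : 1 ≤ (numbers.length : Int) := by
      have := List.length_pos_iff.mpr hnil; omega
    -- B's state via the invariant
    have hBdef : (PySem.List.slice numbers none (some (-1))).reverse.foldl tuxAltStep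
        (PySem.List.pyGetD numbers (-1) 0, 0, none, PySem.List.pyGetD numbers (-1) 0)
        = tuxAltState numbers := by
      rw [PySem.List.slice_to_neg_one, PySem.List.pyGetD_neg_one numbers 0 hnil]
      unfold tuxAltState
      have hgl : numbers.getLastD 0 = numbers.getLast hnil := by
        rw [List.getLastD_eq_getLast?, List.getLast?_eq_some_getLast hnil]
        rfl
      rw [hgl]
    obtain ⟨k, hk, hget, hub, hfirst, ha, _⟩ := tux_alt_inv numbers hnil
    have hklen : k < numbers.length := by
      by_contra hc
      rw [List.getElem?_eq_none_iff.mpr (by omega)] at hget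
      simp at hget
    by_cases hone : numbers.length = 1
    · -- both return 0
      have hk0 : k = 0 := by omega
      simp only [hnil, if_false, hone]
      rw [hBdef]
      simp only [Nat.cast_one]
      rw [hk, hk0]
      simp
    · have hn2 : 2 ≤ (numbers.length : Int) := by
        have : numbers.length ≠ 1 := hone; omega
      have hcast1 : ¬ ((numbers.length : Int) = 0) := by omega
      have hcast2 : ¬ ((numbers.length : Int) = 1) := by omega
      simp only [hnil, hcast1, hcast2, if_false]
      rw [hBdef]
      -- characterize A's fold
      have hinv := tux_fold_inv numbers 1 (PySem.List.pyGetD numbers 0 0) 0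
        (le_refl _) hn1 (le_refl _) (by omega) rfl
        (fun j h0 h1 => by have : j = 0 := by omega
                           subst this; exact le_refl _)
        (fun j h0 h1 => by omega)
      set r := (PySem.List.pyRange 1 (numbers.length : Int) 1).foldl (tuxStep numbers)
        (PySem.List.pyGetD numbers 0 0, 0) with hr
      obtain ⟨⟨hrk0, hrkn⟩, hMk, hle, hltf⟩ := hinv
      set s := tuxAltState numbers with hs
      -- A's max equals B's max
      have hgetE : numbers[k] = s.1 := by
        rw [List.getElem?_eq_getElem hklen] at hget
        exact Option.some.injEq _ _ ▸ (by simpa using hget)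
      have hMeq : r.1 = s.1 := by
        have h1 : r.1 ≤ s.1 := by
          have := hub r.2.toNat r.1 (by
            rw [List.getElem?_eq_getElem (by omega)]
            rw [PySem.List.pyGetD_eq_getElem numbers 0 hrk0 hrkn] at hMk
            rw [hMk])
          exact this
        have h2 : s.1 ≤ r.1 := by
          have := hle (k : Int) (by omega) (by omega)
          rw [PySem.List.pyGetD_eq_getElem numbers 0 (by omega) (by omega)] at this
          simpa [hgetE] using this
        omega
      -- A's index equals B's index
      have hIeq : r.2 = (k : Int) := by
        by_contra hc
        rcases lt_trichotomy r.2 (k : Int) with hlt | heq | hgt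
        · have := hfirst r.2.toNat (by omega) r.1 (by
            rw [List.getElem?_eq_getElem (by omega)]
            rw [PySem.List.pyGetD_eq_getElem numbers 0 hrk0 hrkn] at hMk
            rw [hMk])
          omega
        · exact hc heq
        · have := hltf (k : Int) (by omega) (by omega)
          rw [PySem.List.pyGetD_eq_getElem numbers 0 (by omega) (by omega)] at this
          simp only [Int.toNat_natCast] at this
          rw [hgetE] at this
          omega
      by_cases hb0 : (k : Int) = 0
      · -- both return the index
        simp only [hk, hIeq, hb0]
        simp
      · by_cases hbl : (k : Int) = (numbers.length : Int) - 1
        · -- A takes the edge branch; B's 'a' is none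
          have hanone : s.2.2.1 = none := by
            rw [ha, List.getElem?_eq_none_iff.mpr (by omega)]
          simp only [hIeq, hk, hbl, hanone]
          simp
        · -- interior: A's min-scan passes, both compare against numbers[k+1]
          have hbranch : ¬ (r.2 = 0 ∨ r.2 = (numbers.length : Int) - 1) := by
            intro hor
            rw [hIeq] at hor
            exact hor.elim hb0 hbl
          simp only [hbranch, if_false]
          have hk1 : 1 ≤ r.2 := by omega
          have hmin : (PySem.List.pyRange (r.2 - 1) (-1) (-1)).foldl
              (fun m i => min m (PySem.List.pyGetD numbers i 0)) r.1 < r.1 := by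
            have h1 := tux_min_fold_le_zero numbers (r.2 - 1) (by omega) r.1
            have h2 := hltf 0 (le_refl _) (by omega)
            omega
          have hk1len : k + 1 < numbers.length := by omega
          have hasome : s.2.2.1 = some numbers[k + 1] := by
            rw [ha, List.getElem?_eq_getElem hk1len]
          have hnb : PySem.List.pyGetD numbers ((k : Int) + 1) 0 = numbers[k + 1] := by
            rw [PySem.List.pyGetD_eq_getElem numbers 0 (by omega) (by omega)]
            simp
          rw [hMeq, hIeq] at hmin
          simp only [hk, hasome, hb0, if_false, hMeq, hIeq, hnb]
          by_cases hc : s.1 > numbers[k + 1]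
          · simp [hc, hmin]
          · simp [hc]
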